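-- pv_equiv track=rewrite | github.com/vladZ1nets/Myhomework | homework10_2.py | generate_cube_numbers
-- ===== SOURCE A (Python) =====
-- def generate_cube_numbers(end):
--     list_cub = []
--     for el in range(2, end + 1):
--         new_el = el**3
--         list_cub += [new_el]
--     for el in range(2, end+1):
--         if el in list_cub:
--             yield el
-- ===== SOURCE B (Python) =====
-- def generate_cube_numbers(end):
--     # Generate the in-range perfect cubes directly from their bases,
--     # stopping at the first cube that exceeds end.
--     for k in range(2, end + 1):
--         cube = k ** 3
--         if cube <= end:
--             yield cube
--         else:
--             break
-- ===== Notes on version B (the rewrite author's own statement) =====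
-- stated objective: faster
-- what changed: Instead of materializing all cubes of 2..end and then scanning 2..end with a membership test against that list, B iterates over the cube bases and yields k**3 directly while it stays <= end, breaking at the first overflow.
import Mathlib
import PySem

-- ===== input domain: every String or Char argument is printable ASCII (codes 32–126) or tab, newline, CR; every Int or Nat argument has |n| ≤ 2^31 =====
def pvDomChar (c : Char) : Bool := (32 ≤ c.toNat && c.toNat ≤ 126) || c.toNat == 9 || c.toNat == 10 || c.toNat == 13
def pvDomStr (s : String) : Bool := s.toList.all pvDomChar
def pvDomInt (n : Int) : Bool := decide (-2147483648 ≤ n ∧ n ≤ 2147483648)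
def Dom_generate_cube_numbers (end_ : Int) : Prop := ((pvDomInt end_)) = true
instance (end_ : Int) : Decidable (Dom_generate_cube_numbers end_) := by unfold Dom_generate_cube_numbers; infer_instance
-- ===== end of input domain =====

-- B generates the in-range cubes directly from their bases (stopping at the first cube > end)
-- instead of A's build-all-cubes list plus a membership scan over every candidate value.

-- ===== PORT A =====
def generate_cube_numbers (end_ : Int) : List Int :=
  let list_cub := (PySem.List.pyRange 2 (end_ + 1) 1).foldl (fun acc el => acc ++ [el ^ 3]) []
  (PySem.List.pyRange 2 (end_ + 1) 1).foldl
    (fun acc el => if el ∈ list_cub then acc ++ [el] else acc) []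

-- ===== PORT B =====
-- loop over the cube bases; yield the cube while it is ≤ end, break at the first overflow
def cubeLoop (end_ : Int) : List Int → List Int
  | [] => []
  | k :: ks =>
    let cube := k ^ 3
    if cube ≤ end_ then cube :: cubeLoop end_ ks else []

def generate_cube_numbers_alt (end_ : Int) : List Int :=
  cubeLoop end_ (PySem.List.pyRange 2 (end_ + 1) 1)

-- ===== PRECONDITION & SPEC =====
def Spec_generate_cube_numbers (end_ : Int) (out : List Int) : Prop := out = generate_cube_numbers_alt end_
instance (end_ : Int) (out : List Int) : Decidable (Spec_generate_cube_numbers end_ out) := by unfold Spec_generate_cube_numbers; infer_instance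

-- ===== CLAIM (what is proved, stated in full; the proofs are below) =====
def Claim_equal_generate_cube_numbers : Prop := ∀ (end_ : Int), Dom_generate_cube_numbers end_ → Spec_generate_cube_numbers end_ (generate_cube_numbers end_)

-- ===== LEMMAS AND PROOFS =====

theorem le_cube (k : Int) (h : 2 ≤ k) : k ≤ k ^ 3 := by nlinarith [sq_nonneg k, sq_nonneg (k - 1)]

theorem two_le_cube (k : Int) (h : 2 ≤ k) : 2 ≤ k ^ 3 := by nlinarith [sq_nonneg k, sq_nonneg (k - 1)]

theorem cube_mono (a b : Int) (h2 : 2 ≤ a) (h : a < b) : a ^ 3 < b ^ 3 := by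
  nlinarith [sq_nonneg a, sq_nonneg b, sq_nonneg (a + b)]

-- B's loop is exactly map-cube over the takeWhile prefix
theorem cubeLoop_eq_map_takeWhile (e : Int) (l : List Int) :
    cubeLoop e l = (l.takeWhile (fun k => decide (k ^ 3 ≤ e))).map (fun k => k ^ 3) := by
  induction l with
  | nil => rfl
  | cons k ks ih =>
    simp only [cubeLoop, List.takeWhile]
    by_cases h : k ^ 3 ≤ e <;> simp [h, ih]

-- takeWhile = filter when the predicate is downward-closed along the list
theorem takeWhile_eq_filter_of_pairwise {α : Type} (p : α → Bool) :
    ∀ (l : List α), l.Pairwise (fun a b => p b = true → p a = true) →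
      l.takeWhile p = l.filter p := by
  intro l hl
  induction l with
  | nil => rfl
  | cons a l ih =>
    rcases List.pairwise_cons.mp hl with ⟨ha, hl'⟩
    by_cases h : p a = true
    · simp [List.takeWhile, List.filter, h, ih hl']
    · have : l.filter p = [] := by
        refine List.filter_eq_nil_iff.mpr fun b hb hpb => h (ha b hb hpb)
      simp [List.takeWhile, List.filter, h, this]

-- along the range, "my cube fits" is downward-closed
theorem pairwise_imp_of_range (e : Int) :
    (PySem.List.pyRange 2 (e + 1) 1).Pairwise
      (fun a b => decide (b ^ 3 ≤ e) = true → decide (a ^ 3 ≤ e) = true) := by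
  have h := PySem.List.pairwise_lt_pyRange_one 2 (e + 1)
  refine (List.Pairwise.and_mem.mp h).imp ?_
  rintro a b ⟨hma, hmb, hab⟩
  have ha2 : 2 ≤ a := (PySem.List.mem_pyRange_one.mp hma).1
  intro hb
  have hb' : b ^ 3 ≤ e := of_decide_eq_true hb
  have := cube_mono a b ha2 hab
  exact decide_eq_true (by omega)

-- A's result is Pairwise (<): it is a filter of the strictly increasing range
theorem lemA_pairwise (e : Int) : (generate_cube_numbers e).Pairwise (· < ·) := by
  simp only [generate_cube_numbers, PySem.List.foldl_append_ite_eq_filter, List.nil_append]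
  exact List.Pairwise.sublist (List.filter_sublist) (PySem.List.pairwise_lt_pyRange_one 2 (e + 1))

-- B's result is Pairwise (<): cubes of a strictly increasing list of bases ≥ 2
theorem lemB_pairwise (e : Int) : (generate_cube_numbers_alt e).Pairwise (· < ·) := by
  rw [generate_cube_numbers_alt, cubeLoop_eq_map_takeWhile,
    takeWhile_eq_filter_of_pairwise _ _ (pairwise_imp_of_range e)]
  have h := List.Pairwise.and_mem.mp (PySem.List.pairwise_lt_pyRange_one 2 (e + 1))
  refine List.Pairwise.map (fun k => k ^ 3)
    (R := fun a b => a ∈ PySem.List.pyRange 2 (e + 1) 1 ∧ b ∈ PySem.List.pyRange 2 (e + 1) 1 ∧ a < b)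
    ?_ (List.Pairwise.sublist (List.filter_sublist) h)
  rintro a b ⟨hma, _, hab⟩
  exact cube_mono a b (PySem.List.mem_pyRange_one.mp hma).1 hab

-- membership characterizations: both lists hold exactly the m in [2, end] that are cubes of some k in [2, end]
theorem memA (e m : Int) :
    m ∈ generate_cube_numbers e ↔ (2 ≤ m ∧ m ≤ e) ∧ ∃ k, (2 ≤ k ∧ k ≤ e) ∧ k ^ 3 = m := by
  simp only [generate_cube_numbers, PySem.List.foldl_append_ite_eq_filter,
    PySem.List.foldl_append_singleton_eq_map, List.nil_append, List.mem_filter,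
    List.mem_map, decide_eq_true_eq, PySem.List.mem_pyRange_one]
  constructor
  · rintro ⟨⟨h1, h2⟩, k, ⟨hk1, hk2⟩, hk3⟩
    exact ⟨⟨h1, by omega⟩, k, ⟨hk1, by omega⟩, hk3⟩
  · rintro ⟨⟨h1, h2⟩, k, ⟨hk1, hk2⟩, hk3⟩
    exact ⟨⟨h1, by omega⟩, k, ⟨hk1, by omega⟩, hk3⟩

theorem memB (e m : Int) :
    m ∈ generate_cube_numbers_alt e ↔ (2 ≤ m ∧ m ≤ e) ∧ ∃ k, (2 ≤ k ∧ k ≤ e) ∧ k ^ 3 = m := by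
  rw [generate_cube_numbers_alt, cubeLoop_eq_map_takeWhile,
    takeWhile_eq_filter_of_pairwise _ _ (pairwise_imp_of_range e)]
  simp only [List.mem_map, List.mem_filter, PySem.List.mem_pyRange_one, decide_eq_true_eq]
  constructor
  · rintro ⟨k, ⟨⟨hk1, hk2⟩, hk3⟩, hk4⟩
    subst hk4
    exact ⟨⟨two_le_cube k hk1, hk3⟩, k, ⟨hk1, by omega⟩, rfl⟩
  · rintro ⟨⟨h1, h2⟩, k, ⟨hk1, hk2⟩, hk3⟩
    have hk3e : k ^ 3 ≤ e := by omega
    have hkk := le_cube k hk1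
    exact ⟨k, ⟨⟨hk1, by omega⟩, hk3e⟩, hk3⟩

-- ===== VERDICT (by name: the statement is the Claim_ definition above) =====
theorem generate_cube_numbers_spec : Claim_equal_generate_cube_numbers := by
  intro e _
  unfold Spec_generate_cube_numbers
  exact (lemA_pairwise e).eq_of_mem_iff (lemB_pairwise e)
    (fun m => (memA e m).trans (memB e m).symm)
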